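-- pv_equiv track=rewrite | github.com/jiiyeon/Algorithm_Prac | stage08/06.py | cnt_people
-- ===== SOURCE A (Python) =====
-- def     sub_sum(list, idx) :
--
--     i = 0
--     sum = 0
--     while (i <= idx) :
--         sum += list[i]
--         i += 1
--
--     return(sum)
--
-- def     cnt_people(floor, col) :
--
--     total_lst = []
--     element_lst = list(range(1, col + 1))
--
--     i = 0
--     while (i <= floor) :
--
--         total_lst.append(element_lst)
--
--         r = 0
--         while (r < len(element_lst)) :
--             element_lst[r] = sub_sum(element_lst, r)
--             r += 1
--         i +=1
--
--     return(total_lst[floor][col - 1])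
-- ===== SOURCE B (Python) =====
-- def cnt_people(floor, col):
--     a = list(range(1, col + 1))
--     for _ in range(floor + 1):
--         s = 0
--         for r in range(len(a)):
--             a[r] += s
--             s += a[r]
--     return a[col - 1]
-- ===== Notes on version B (the rewrite author's own statement) =====
-- stated objective: faster
-- what changed: Each pass now updates the list with a single running cumulative sum (a[r] += s; s += a[r]) instead of calling sub_sum, which rescans the whole prefix for every index, so a pass costs O(col) instead of O(col^2).
import Mathlib
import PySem

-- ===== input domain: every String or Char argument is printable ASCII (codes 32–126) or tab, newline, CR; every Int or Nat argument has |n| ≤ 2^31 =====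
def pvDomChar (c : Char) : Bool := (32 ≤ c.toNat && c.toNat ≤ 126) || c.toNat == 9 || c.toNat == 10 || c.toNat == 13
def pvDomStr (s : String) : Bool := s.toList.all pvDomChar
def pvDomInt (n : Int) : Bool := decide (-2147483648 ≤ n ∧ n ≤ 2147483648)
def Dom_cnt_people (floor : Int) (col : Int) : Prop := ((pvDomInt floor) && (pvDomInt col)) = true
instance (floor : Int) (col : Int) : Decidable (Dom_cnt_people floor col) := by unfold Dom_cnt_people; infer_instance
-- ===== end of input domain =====

-- B replaces A's quadratic per-pass prefix-summing (sub_sum rescans the prefix for every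
-- index) by a single running-sum sweep per pass: O(floor*col) instead of O(floor*col^2).

-- ===== PORT A =====
-- sub_sum's while loop: i counts up, sum accumulates list[i]; fuel = number of iterations.
-- (pyGet? …).getD 0 stands for list[i]; inside Pre_ every access is in range so the default never fires.
def subSumLoop (l : List Int) : Nat → Int → Nat → Int
  | _, s, 0 => s
  | i, s, fuel + 1 => subSumLoop l (i + 1) (s + ((PySem.List.pyGet? l (i : Int)).getD 0)) fuel

def subSum (l : List Int) (idx : Int) : Int := subSumLoop l 0 0 (idx + 1).toNat

-- inner while loop: element_lst[r] = sub_sum(element_lst, r); fuel = len - r.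
def innerLoop : List Int → Nat → Nat → List Int
  | l, _, 0 => l
  | l, r, fuel + 1 => innerLoop (l.set r (subSum l (r : Int))) (r + 1) fuel

-- outer while loop. Python appends the SAME list object to total_lst each time, so
-- total_lst[floor] aliases the final element_lst; the port returns that final list's entry.
def outerLoop : List Int → Nat → List Int
  | l, 0 => l
  | l, n + 1 => outerLoop (innerLoop l 0 l.length) n

def cnt_people (floor : Int) (col : Int) : Int :=
  let element_lst := PySem.List.pyRange 1 (col + 1) 1
  let final := outerLoop element_lst (floor + 1).toNat
  (PySem.List.pyGet? final (col - 1)).getD 0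

-- ===== PORT B =====
-- Source B's pass: a[r] += s; s += a[r] — structural recursion carrying the running sum s.
def passB : List Int → Int → List Int
  | [], _ => []
  | x :: xs, s => let y := x + s; y :: passB xs (s + y)

def bLoop : List Int → Nat → List Int
  | a, 0 => a
  | a, n + 1 => bLoop (passB a 0) n

def cnt_people_alt (floor : Int) (col : Int) : Int :=
  let a := PySem.List.pyRange 1 (col + 1) 1
  let fin := bLoop a (floor + 1).toNat
  (PySem.List.pyGet? fin (col - 1)).getD 0

-- ===== PRECONDITION & SPEC =====
-- A raises IndexError when floor < 0 (total_lst is empty) or col < 1 (element_lst is empty).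
def Pre_cnt_people (floor : Int) (col : Int) : Prop := 0 ≤ floor ∧ 1 ≤ col
instance (floor : Int) (col : Int) : Decidable (Pre_cnt_people floor col) := by unfold Pre_cnt_people; infer_instance
def pvWitness_cnt_people : Int × Int := (2, 4)

def Spec_cnt_people (floor : Int) (col : Int) (out : Int) : Prop := out = cnt_people_alt floor col
instance (floor : Int) (col : Int) (out : Int) : Decidable (Spec_cnt_people floor col out) := by unfold Spec_cnt_people; infer_instance

-- ===== CLAIM (what is proved, stated in full; the proofs are below) =====
def Claim_equal_cnt_people : Prop := ∀ (floor : Int) (col : Int), Dom_cnt_people floor col → Pre_cnt_people floor col → Spec_cnt_people floor col (cnt_people floor col)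
-- ===== LEMMAS AND PROOFS =====

theorem subSumLoop_eq (l : List Int) : ∀ (n i : Nat) (s : Int), i + n ≤ l.length →
    subSumLoop l i s n = s + (((l.drop i).take n).sum) := by
  intro n
  induction n with
  | zero => intro i s _; simp [subSumLoop]
  | succ m ih =>
    intro i s h
    have hi : i < l.length := by omega
    have hget : PySem.List.pyGet? l (i : Int) = some l[i] := by
      simp [hi]
    have hdrop : l.drop i = l[i] :: l.drop (i + 1) := List.drop_eq_getElem_cons hi
    rw [subSumLoop, ih (i + 1) _ (by omega), hget, Option.getD_some, hdrop,
      List.take_succ_cons, List.sum_cons]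
    ring

theorem subSum_eq (l : List Int) (r : Nat) (h : r < l.length) :
    subSum l (r : Int) = (l.take (r + 1)).sum := by
  have : ((r : Int) + 1).toNat = r + 1 := by omega
  rw [subSum, this, subSumLoop_eq l (r + 1) 0 0 (by omega)]
  simp

theorem innerLoop_eq (fuel : Nat) : ∀ (l : List Int) (r : Nat), fuel = l.length - r →
    innerLoop l r fuel = l.take r ++ passB (l.drop r) ((l.take r).sum) := by
  induction fuel with
  | zero =>
    intro l r h
    have : l.length ≤ r := by omega
    simp [innerLoop, passB, List.drop_eq_nil_of_le this, List.take_of_length_le this]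
  | succ m ih =>
    intro l r h
    have hr : r < l.length := by omega
    set s := (l.take r).sum with hs
    have hsum : (l.take (r + 1)).sum = l[r] + s := by
      rw [List.take_add_one, List.sum_append, List.getElem?_eq_getElem hr]
      simp [hs, add_comm]
    have hset : l.set r (subSum l (r : Int)) = l.take r ++ (l[r] + s) :: l.drop (r + 1) := by
      rw [List.set_eq_take_append_cons_drop, if_pos hr, subSum_eq l r hr, hsum]
    have hltk : (l.take r).length = r := by simp [Nat.min_eq_left (le_of_lt hr)]
    rw [innerLoop, ih _ (r + 1) (by simp [hset]; omega)]
    rw [hset]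
    have htk : (l.take r ++ (l[r] + s) :: l.drop (r + 1)).take (r + 1)
        = l.take r ++ [l[r] + s] := by
      rw [List.take_append, hltk]
      simp
    have hdp : (l.take r ++ (l[r] + s) :: l.drop (r + 1)).drop (r + 1) = l.drop (r + 1) := by
      rw [List.drop_append, hltk]
      simp
    have hsum2 : (l.take r ++ [l[r] + s]).sum = s + (l[r] + s) := by
      rw [List.sum_append, ← hs]
      simp
    have hdropr : l.drop r = l[r] :: l.drop (r + 1) := List.drop_eq_getElem_cons hr
    rw [htk, hdp, hsum2, hdropr]
    simp [passB, List.append_assoc]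

theorem innerLoop_eq_passB (l : List Int) : innerLoop l 0 l.length = passB l 0 := by
  have := innerLoop_eq l.length l 0 (by omega)
  simpa using this

theorem outerLoop_eq_bLoop (n : Nat) : ∀ l : List Int, outerLoop l n = bLoop l n := by
  induction n with
  | zero => intro l; rfl
  | succ m ih =>
    intro l
    rw [outerLoop, bLoop, innerLoop_eq_passB, ih]

-- ===== VERDICT (by name: the statement is the Claim_ definition above) =====
theorem cnt_people_spec : Claim_equal_cnt_people := by
  intro floor col _ _
  unfold Spec_cnt_people
  simp only [cnt_people, cnt_people_alt, outerLoop_eq_bLoop]
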